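-- pv_equiv track=rewrite | github.com/move-ucsb/VASA | VASA/preprocessing/reduce_vasa_df.py | reduce_by_recency
-- ===== SOURCE A (Python) =====
-- from typing import List, Tuple, Callable
-- from functools import reduce
--
-- HC_List = List[Tuple[int, int]]
--
-- County_History_List = List[List[int]]
--
-- County_list = List[int]
--
-- def reduce_by_count(arr: County_History_List) -> HC_List:
--
--     # Start with pairs of 0 for each county
--     initial: HC_List = [(0, 0) for _ in range(len(arr[0]))]
--
--     reducer: Callable[[HC_List, List[int]], HC_List] = lambda acc, curr: [
--         (a[0] + (c == 1), a[1] + (c == 2)) for a, c in zip(acc, curr)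
--     ]
--
--     hh_ll: HC_List = reduce(
--         reducer,
--         arr,
--         initial
--     )
--
--     return hh_ll
--
-- def reduce_by_recency(arr: County_History_List) -> County_list:
--     return [
--         (hh if clas == 1 else (ll if clas == 2 else 0))
--         for hh, ll, clas in zip(
--             reduce_by_recency_hh(arr),
--             reduce_by_recency_ll(arr),
--             reduce_by_mode_sig(arr)
--         )
--     ]
--
-- def reduce_by_recency_hh(arr: County_History_List) -> County_list:
--     return reduce_by_recency_equals(arr, 1)
--
-- def reduce_by_recency_ll(arr: County_History_List) -> County_list:
--     return reduce_by_recency_equals(arr, 2)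
--
-- def reduce_by_recency_equals(
--     arr: County_History_List,
--     val: int
-- ) -> County_list:
--     return [
--         max([
--             (idx if week[county_idx] == val else 0)
--             for idx, week in enumerate(arr)
--         ])
--         for county_idx in range(len(arr[0]))
--     ]
--
-- def reduce_by_mode_sig(arr: County_History_List) -> County_list:
--     output: County_list = []
--
--     for hh, ll in reduce_by_count(arr):
--         region_class = 1 if hh > ll else 2
--         output.append(region_class if max(hh, ll) > 0 else 0)
--
--     return output
-- ===== SOURCE B (Python) =====
-- def reduce_by_recency(arr):
--     C = len(arr[0])
--     # one pass: per-county state (last1, last2, cnt1, cnt2)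
--     state = [(0, 0, 0, 0)] * C
--     for idx, week in enumerate(arr):
--         state = [
--             (idx, l2, c1 + 1, c2) if week[c] == 1
--             else ((l1, idx, c1, c2 + 1) if week[c] == 2
--                   else (l1, l2, c1, c2))
--             for c, (l1, l2, c1, c2) in enumerate(state)
--         ]
--     return [
--         0 if c1 == 0 and c2 == 0 else (l1 if c1 > c2 else l2)
--         for (l1, l2, c1, c2) in state
--     ]
-- ===== Notes on version B (the rewrite author's own statement) =====
-- stated objective: alternative
-- what changed: A makes four chained passes over the data (a last-index-of-1 scan, a last-index-of-2 scan, a count reduce, a mode pass) and zips them; B computes the same per-county answer in a single scan over the rows maintaining (last1, last2, cnt1, cnt2) per county.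
import Mathlib
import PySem

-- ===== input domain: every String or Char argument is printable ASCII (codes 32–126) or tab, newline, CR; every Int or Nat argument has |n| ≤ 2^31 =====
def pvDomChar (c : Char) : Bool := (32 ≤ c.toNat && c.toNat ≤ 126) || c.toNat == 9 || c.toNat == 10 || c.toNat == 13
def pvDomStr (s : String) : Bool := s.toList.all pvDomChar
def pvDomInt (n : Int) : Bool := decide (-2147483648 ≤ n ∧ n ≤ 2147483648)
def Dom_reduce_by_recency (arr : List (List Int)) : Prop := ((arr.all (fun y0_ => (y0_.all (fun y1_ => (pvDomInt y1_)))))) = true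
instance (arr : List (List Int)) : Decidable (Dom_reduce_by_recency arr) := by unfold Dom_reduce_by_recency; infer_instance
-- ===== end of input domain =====

-- B replaces A's four chained passes (two recency scans, a count reduce, a mode pass, then zip3)
-- with a single maintained-state scan over the rows; alternative decomposition, same asymptotic cost.

-- ===== PORT A =====
def pvCountStep (acc : List (Int × Int)) (curr : List Int) : List (Int × Int) :=
  (acc.zip curr).map (fun p => (p.1.1 + (if p.2 = 1 then 1 else 0), p.1.2 + (if p.2 = 2 then 1 else 0)))

-- len(arr[0]) is ported as (arr.headD []).length: Pre_ guarantees arr ≠ [], where Python would raise IndexError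
def reduce_by_count (arr : List (List Int)) : List (Int × Int) :=
  arr.foldl pvCountStep (List.replicate (arr.headD []).length ((0 : Int), (0 : Int)))

-- max([...]) of the (nonempty, since arr ≠ []) comprehension: PySem.List.max?; .getD 0 is never used under Pre_
def reduce_by_recency_equals (arr : List (List Int)) (val : Int) : List Int :=
  (PySem.List.pyRange 0 (PySem.List.len (arr.headD [])) 1).map (fun ci =>
    ((PySem.List.max? ((PySem.List.enumerate arr 0).map
        (fun p => if PySem.List.pyGetD p.2 ci 0 = val then p.1 else 0)) (fun y => y)).getD 0))

def reduce_by_recency_hh (arr : List (List Int)) : List Int := reduce_by_recency_equals arr 1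

def reduce_by_recency_ll (arr : List (List Int)) : List Int := reduce_by_recency_equals arr 2

def reduce_by_mode_sig (arr : List (List Int)) : List Int :=
  (reduce_by_count arr).foldl (fun output p =>
    output ++ [if max p.1 p.2 > 0 then (if p.1 > p.2 then (1 : Int) else 2) else 0]) []

def reduce_by_recency (arr : List (List Int)) : List Int :=
  ((reduce_by_recency_hh arr).zip ((reduce_by_recency_ll arr).zip (reduce_by_mode_sig arr))).map
    (fun p => if p.2.2 = 1 then p.1 else if p.2.2 = 2 then p.2.1 else 0)

-- ===== PORT B =====
-- one row of B's scan: update each county's (last1, last2, cnt1, cnt2)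
def pvAltStep (idx : Int) (week : List Int) (st : List (Int × Int × Int × Int)) : List (Int × Int × Int × Int) :=
  (PySem.List.enumerate st 0).map (fun q =>
    if PySem.List.pyGetD week q.1 0 = 1 then (idx, q.2.2.1, q.2.2.2.1 + 1, q.2.2.2.2)
    else if PySem.List.pyGetD week q.1 0 = 2 then (q.2.1, idx, q.2.2.2.1, q.2.2.2.2 + 1)
    else q.2)

def reduce_by_recency_alt (arr : List (List Int)) : List Int :=
  let st := (PySem.List.enumerate arr 0).foldl (fun st p => pvAltStep p.1 p.2 st)
    (List.replicate (arr.headD []).length ((0 : Int), (0 : Int), (0 : Int), (0 : Int)))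
  st.map (fun s => if s.2.2.1 = 0 ∧ s.2.2.2 = 0 then 0 else if s.2.2.1 > s.2.2.2 then s.1 else s.2.1)

-- ===== PRECONDITION & SPEC =====
-- Pre_ excludes exactly the inputs where A raises IndexError: empty arr (arr[0]),
-- and a row shorter than row 0 (week[county_idx] in reduce_by_recency_equals).
def Pre_reduce_by_recency (arr : List (List Int)) : Prop :=
  arr ≠ [] ∧ ∀ w ∈ arr, (arr.headD []).length ≤ w.length
instance (arr : List (List Int)) : Decidable (Pre_reduce_by_recency arr) := by
  unfold Pre_reduce_by_recency; infer_instance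

def pvWitness_reduce_by_recency : List (List Int) := [[1, 2, 0], [2, 0, 1], [2, 1, 0]]

def Spec_reduce_by_recency (arr : List (List Int)) (out : List Int) : Prop := out = reduce_by_recency_alt arr
instance (arr : List (List Int)) (out : List Int) : Decidable (Spec_reduce_by_recency arr out) := by
  unfold Spec_reduce_by_recency; infer_instance

-- ===== CLAIM (what is proved, stated in full; the proofs are below) =====
def Claim_equal_reduce_by_recency : Prop := ∀ (arr : List (List Int)), Dom_reduce_by_recency arr → Pre_reduce_by_recency arr → Spec_reduce_by_recency arr (reduce_by_recency arr)

-- ===== LEMMAS AND PROOFS =====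

-- per-column versions of the two programs' loop bodies
def pvCell (ci : Nat) (t : Int × Int × Int × Int) (p : Int × List Int) : Int × Int × Int × Int :=
  if p.2.getD ci 0 = 1 then (p.1, t.2.1, t.2.2.1 + 1, t.2.2.2)
  else if p.2.getD ci 0 = 2 then (t.1, p.1, t.2.2.1, t.2.2.2 + 1)
  else t

def pvMaxF (v : Int) (ci : Nat) (m : Int) (p : Int × List Int) : Int :=
  max m (if p.2.getD ci 0 = v then p.1 else 0)

def pvCntF (v : Int) (ci : Nat) (c : Int) (w : List Int) : Int :=
  c + (if w.getD ci 0 = v then 1 else 0)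

-- the heart: B's per-county 4-tuple fold is A's two running maxima and two counts
lemma pv_core (ci : Nat) (rows : List (List Int)) : ∀ (s l1 l2 c1 c2 : Int),
    0 ≤ l1 → l1 ≤ s → 0 ≤ l2 → l2 ≤ s →
    (PySem.List.enumerate rows s).foldl (pvCell ci) (l1, l2, c1, c2)
    = ((PySem.List.enumerate rows s).foldl (pvMaxF 1 ci) l1,
       (PySem.List.enumerate rows s).foldl (pvMaxF 2 ci) l2,
       rows.foldl (pvCntF 1 ci) c1,
       rows.foldl (pvCntF 2 ci) c2) := by
  induction rows with
  | nil => intro s l1 l2 c1 c2 _ _ _ _; simp [PySem.List.enumerate_nil]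
  | cons w rest ih =>
    intro s l1 l2 c1 c2 h1 h2 h3 h4
    rw [PySem.List.enumerate_cons]
    simp only [List.foldl_cons]
    by_cases hv1 : w[ci]?.getD 0 = 1
    · rw [show pvCell ci (l1, l2, c1, c2) (s, w) = (s, l2, c1 + 1, c2) by simp [pvCell, hv1]]
      rw [show pvMaxF 1 ci l1 (s, w) = s by simp [pvMaxF, hv1]; omega]
      rw [show pvMaxF 2 ci l2 (s, w) = l2 by simp [pvMaxF, hv1]; omega]
      rw [show pvCntF 1 ci c1 w = c1 + 1 by simp [pvCntF, hv1]]
      rw [show pvCntF 2 ci c2 w = c2 by simp [pvCntF, hv1]]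
      exact ih (s + 1) s l2 (c1 + 1) c2 (by omega) (by omega) (by omega) (by omega)
    · by_cases hv2 : w[ci]?.getD 0 = 2
      · rw [show pvCell ci (l1, l2, c1, c2) (s, w) = (l1, s, c1, c2 + 1) by simp [pvCell, hv1, hv2]]
        rw [show pvMaxF 1 ci l1 (s, w) = l1 by simp [pvMaxF, hv1]; omega]
        rw [show pvMaxF 2 ci l2 (s, w) = s by simp [pvMaxF, hv2]; omega]
        rw [show pvCntF 1 ci c1 w = c1 by simp [pvCntF, hv1]]
        rw [show pvCntF 2 ci c2 w = c2 + 1 by simp [pvCntF, hv2]]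
        exact ih (s + 1) l1 s c1 (c2 + 1) (by omega) (by omega) (by omega) (by omega)
      · rw [show pvCell ci (l1, l2, c1, c2) (s, w) = (l1, l2, c1, c2) by simp [pvCell, hv1, hv2]]
        rw [show pvMaxF 1 ci l1 (s, w) = l1 by simp [pvMaxF, hv1]; omega]
        rw [show pvMaxF 2 ci l2 (s, w) = l2 by simp [pvMaxF, hv2]; omega]
        rw [show pvCntF 1 ci c1 w = c1 by simp [pvCntF, hv1]]
        rw [show pvCntF 2 ci c2 w = c2 by simp [pvCntF, hv2]]
        exact ih (s + 1) l1 l2 c1 c2 (by omega) (by omega) (by omega) (by omega)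

lemma pv_cnt_nonneg (v : Int) (ci : Nat) (rows : List (List Int)) : ∀ (c : Int), 0 ≤ c →
    0 ≤ rows.foldl (pvCntF v ci) c := by
  induction rows with
  | nil => intro c hc; simpa using hc
  | cons w rest ih =>
    intro c hc
    simp only [List.foldl_cons]
    exact ih _ (by unfold pvCntF; split <;> omega)

lemma pv_alt_fold_length (rows : List (List Int)) : ∀ (s : Int) (st : List (Int × Int × Int × Int)),
    ((PySem.List.enumerate rows s).foldl (fun st p => pvAltStep p.1 p.2 st) st).length = st.length := by
  induction rows with
  | nil => intro s st; simp [PySem.List.enumerate_nil]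
  | cons w rest ih =>
    intro s st
    rw [PySem.List.enumerate_cons]
    simp only [List.foldl_cons]
    rw [ih]
    simp [pvAltStep, PySem.List.length_enumerate]

lemma pv_alt_fold_get (rows : List (List Int)) : ∀ (s : Int) (st : List (Int × Int × Int × Int))
    (ci : Nat) (h : ci < st.length),
    ((PySem.List.enumerate rows s).foldl (fun st p => pvAltStep p.1 p.2 st) st)[ci]?
    = some ((PySem.List.enumerate rows s).foldl (pvCell ci) st[ci]) := by
  induction rows with
  | nil => intro s st ci h; simp [PySem.List.enumerate_nil, List.getElem?_eq_getElem h]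
  | cons w rest ih =>
    intro s st ci h
    rw [PySem.List.enumerate_cons]
    simp only [List.foldl_cons]
    have hlen : ci < (pvAltStep s w st).length := by
      simpa [pvAltStep, PySem.List.length_enumerate] using h
    rw [ih (s + 1) _ ci hlen]
    congr 1
    have hmap : (pvAltStep s w st)[ci] = pvCell ci st[ci] (s, w) := by
      simp [pvAltStep, PySem.List.getElem_enumerate, pvCell, List.getD]
    rw [hmap]

lemma pv_count_fold (rows : List (List Int)) : ∀ (acc : List (Int × Int)),
    (∀ w ∈ rows, acc.length ≤ w.length) →
    (rows.foldl pvCountStep acc).length = acc.length ∧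
    ∀ (ci : Nat) (h : ci < acc.length),
      (rows.foldl pvCountStep acc)[ci]?
      = some (rows.foldl (fun a w => (pvCntF 1 ci a.1 w, pvCntF 2 ci a.2 w)) acc[ci]) := by
  induction rows with
  | nil =>
    intro acc _
    exact ⟨rfl, fun ci h => by simp [List.getElem?_eq_getElem h]⟩
  | cons w rest ih =>
    intro acc hlen
    have hw : acc.length ≤ w.length := hlen w (by simp)
    have hstep : (pvCountStep acc w).length = acc.length := by
      simp [pvCountStep]; omega
    have hrest : ∀ u ∈ rest, (pvCountStep acc w).length ≤ u.length := by
      intro u hu; rw [hstep]; exact hlen u (by simp [hu])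
    obtain ⟨ihl, ihg⟩ := ih (pvCountStep acc w) hrest
    constructor
    · simp only [List.foldl_cons]; rw [ihl, hstep]
    · intro ci h
      simp only [List.foldl_cons]
      rw [ihg ci (by omega : ci < (pvCountStep acc w).length)]
      congr 1
      have hz : ci < (acc.zip w).length := by simp; omega
      have : (pvCountStep acc w)[ci] = (pvCntF 1 ci acc[ci].1 w, pvCntF 2 ci acc[ci].2 w) := by
        simp [pvCountStep, List.getElem_zip, pvCntF, List.getD,
          List.getElem?_eq_getElem (by omega : ci < w.length)]
      rw [this]

lemma pv_equals_get (a0 : List Int) (rest : List (List Int)) (val : Int) (ci : Nat) (h : ci < a0.length) :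
    (reduce_by_recency_equals (a0 :: rest) val)[ci]?
    = some ((PySem.List.enumerate (a0 :: rest) 0).foldl (pvMaxF val ci) 0) := by
  unfold reduce_by_recency_equals
  rw [List.getElem?_map, PySem.List.getElem?_pyRange_one]
  rw [if_pos (by simpa using h)]
  simp only [Option.map_some, zero_add]
  rw [PySem.List.enumerate_cons, List.map_cons, PySem.List.max?_id_cons]
  simp only [Option.getD_some]
  congr 1
  rw [List.foldl_cons]
  have h0 : (if PySem.List.pyGetD a0 (ci : Int) 0 = val then (0:Int) else 0) = 0 := by
    split <;> rfl
  have hm : pvMaxF val ci 0 (0, a0) = 0 := by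
    simp [pvMaxF]
  rw [h0, hm, List.foldl_map]
  have hfun : (fun (m : Int) (p : Int × List Int) =>
      max m (if PySem.List.pyGetD p.2 (ci : Int) 0 = val then p.1 else 0)) = pvMaxF val ci := by
    funext m p
    rw [PySem.List.pyGetD_natCast]
    rfl
  rw [hfun]

lemma pv_equals_length (a0 : List Int) (rest : List (List Int)) (val : Int) :
    (reduce_by_recency_equals (a0 :: rest) val).length = a0.length := by
  simp [reduce_by_recency_equals]

lemma pv_mode_sig_eq (arr : List (List Int)) :
    reduce_by_mode_sig arr = (reduce_by_count arr).map
      (fun p => if max p.1 p.2 > 0 then (if p.1 > p.2 then (1 : Int) else 2) else 0) := by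
  simpa [reduce_by_mode_sig] using
    PySem.List.foldl_append_singleton_eq_map
      (fun p : Int × Int => if max p.1 p.2 > 0 then (if p.1 > p.2 then (1 : Int) else 2) else 0)
      (reduce_by_count arr) []

-- A's classify-then-select equals B's direct selection, for nonnegative counts
lemma pv_combine (M1 M2 K1 K2 : Int) (h1 : 0 ≤ K1) (h2 : 0 ≤ K2) :
    (if (if max K1 K2 > 0 then (if K1 > K2 then (1 : Int) else 2) else 0) = 1 then M1
     else if (if max K1 K2 > 0 then (if K1 > K2 then (1 : Int) else 2) else 0) = 2 then M2 else 0)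
    = if K1 = 0 ∧ K2 = 0 then 0 else if K1 > K2 then M1 else M2 := by
  split_ifs <;> first | rfl | omega

-- ===== VERDICT (by name: the statement is the Claim_ definition above) =====
theorem reduce_by_recency_spec : Claim_equal_reduce_by_recency := by
  intro arr _ hpre
  obtain ⟨hne, hlen⟩ := hpre
  obtain ⟨a0, rest, rfl⟩ := List.exists_cons_of_ne_nil hne
  have hhd : (a0 :: rest).headD [] = a0 := rfl
  rw [hhd] at hlen
  unfold Spec_reduce_by_recency
  -- B side state
  have hstlen : ((PySem.List.enumerate (a0 :: rest) 0).foldl (fun st p => pvAltStep p.1 p.2 st)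
      (List.replicate a0.length ((0 : Int), (0 : Int), (0 : Int), (0 : Int)))).length = a0.length := by
    rw [pv_alt_fold_length]; simp
  -- A side count fold
  have hcnt := pv_count_fold (a0 :: rest) (List.replicate a0.length ((0 : Int), (0 : Int)))
      (by intro w hw; simpa using hlen w hw)
  apply List.ext_getElem?
  intro n
  by_cases hn : n < a0.length
  · -- element-wise equality at n
    have hM1 := pv_equals_get a0 rest 1 n hn
    have hM2 := pv_equals_get a0 rest 2 n hn
    have hK := hcnt.2 n (by simpa using hn)
    rw [List.getElem_replicate] at hK
    rw [PySem.List.foldl_prod_mk (pvCntF 1 n) (pvCntF 2 n)] at hK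
    have hK1 : 0 ≤ (a0 :: rest).foldl (pvCntF 1 n) 0 := pv_cnt_nonneg 1 n _ 0 le_rfl
    have hK2 : 0 ≤ (a0 :: rest).foldl (pvCntF 2 n) 0 := pv_cnt_nonneg 2 n _ 0 le_rfl
    -- B element
    have hB := pv_alt_fold_get (a0 :: rest) 0
        (List.replicate a0.length ((0 : Int), (0 : Int), (0 : Int), (0 : Int))) n (by simpa using hn)
    rw [List.getElem_replicate] at hB
    rw [pv_core n (a0 :: rest) 0 0 0 0 0 le_rfl le_rfl le_rfl le_rfl] at hB
    have hsig : (reduce_by_mode_sig (a0 :: rest))[n]? =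
        some (if max (List.foldl (pvCntF 1 n) 0 (a0 :: rest)) (List.foldl (pvCntF 2 n) 0 (a0 :: rest)) > 0
              then (if List.foldl (pvCntF 1 n) 0 (a0 :: rest) > List.foldl (pvCntF 2 n) 0 (a0 :: rest)
                    then (1 : Int) else 2) else 0) := by
      rw [pv_mode_sig_eq, List.getElem?_map]
      unfold reduce_by_count
      simp only [List.headD_cons]
      rw [hK, Option.map_some]
    -- assemble
    unfold reduce_by_recency reduce_by_recency_hh reduce_by_recency_ll reduce_by_recency_alt
    rw [hhd]
    rw [List.getElem?_map, List.getElem?_map]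
    have hzip : ((reduce_by_recency_equals (a0 :: rest) 1).zip
        ((reduce_by_recency_equals (a0 :: rest) 2).zip (reduce_by_mode_sig (a0 :: rest))))[n]? =
        some (List.foldl (pvMaxF 1 n) 0 (PySem.List.enumerate (a0 :: rest) 0),
              List.foldl (pvMaxF 2 n) 0 (PySem.List.enumerate (a0 :: rest) 0),
              (if max (List.foldl (pvCntF 1 n) 0 (a0 :: rest)) (List.foldl (pvCntF 2 n) 0 (a0 :: rest)) > 0
               then (if List.foldl (pvCntF 1 n) 0 (a0 :: rest) > List.foldl (pvCntF 2 n) 0 (a0 :: rest)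
                     then (1 : Int) else 2) else 0)) := by
      rw [List.getElem?_zip_eq_some]
      exact ⟨hM1, by rw [List.getElem?_zip_eq_some]; exact ⟨hM2, hsig⟩⟩
    rw [hzip, hB]
    simp only [Option.map_some]
    congr 1
    exact pv_combine _ _ _ _ hK1 hK2
  · -- both sides are none beyond the common length
    have hA : ((reduce_by_recency_hh (a0 :: rest)).zip
        ((reduce_by_recency_ll (a0 :: rest)).zip (reduce_by_mode_sig (a0 :: rest)))).length ≤ n := by
      rw [List.length_zip, List.length_zip]
      rw [pv_mode_sig_eq]
      rw [List.length_map]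
      unfold reduce_by_count
      simp only [List.headD_cons]
      rw [hcnt.1]
      unfold reduce_by_recency_hh reduce_by_recency_ll
      rw [pv_equals_length, pv_equals_length]
      simp
      omega
    unfold reduce_by_recency reduce_by_recency_alt
    rw [hhd]
    rw [List.getElem?_map, List.getElem?_map]
    rw [List.getElem?_eq_none hA, List.getElem?_eq_none (by omega : ((PySem.List.enumerate (a0 :: rest) 0).foldl (fun st p => pvAltStep p.1 p.2 st) (List.replicate a0.length ((0 : Int), (0 : Int), (0 : Int), (0 : Int)))).length ≤ n)]
    rfl
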